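-- pv_equiv track=rewrite | github.com/agh-bit-academy/SummerProject2022 | WDI/Zestaw_6/Zadanie_02/sol.py | f
-- ===== SOURCE A (Python) =====
-- def weight_count(x):
--     if x == 1:
--         return 0
--     weight = 0
--     divisor = 2
--     while x > 1 and divisor < x // 2:
--         if x % divisor == 0:
--             weight += 1
--             while x % divisor == 0:
--                 x //= divisor
--         divisor += 1
--     return weight
--
-- def f(A):
--     n = len(A)
--     weight_tab = [0 for _ in range(n)]
--     sum = 0
--     for i in range(n):
--         weight_tab[i] = weight_count(A[i])
--         sum += weight_tab[i]
--     if sum % 3 != 0: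
--         return False
--     if rec(weight_tab):
--         return True
--     return False
--
-- def rec(tab, i=0, s1=0, s2=0, s3=0):
--     if i == len(tab):
--         return s1 == s2 and s2 == s3
--     return rec(tab, i + 1, s1 + tab[i], s2, s3) or rec(tab, i + 1, s1, s2 + tab[i], s3)\
--          or rec(tab, i + 1, s1, s2, s3 + tab[i])
-- ===== SOURCE B (Python) =====
-- def _find_div(x, p=2):
--     # smallest divisor p of x with 2 <= p < x // 2, or None
--     while x > 1 and p < x // 2:
--         if x % p == 0:
--             return p
--         p += 1
--     return None
--
-- def _wc(x):
--     if x <= 1: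
--         return 0
--     p = _find_div(x)
--     if p is None:
--         return 0
--     while x % p == 0:
--         x //= p
--     return 1 + _wc(x)
--
-- def f(A):
--     weights = [_wc(a) for a in A]
--     total = sum(weights)
--     if total % 3 != 0:
--         return False
--     target = total // 3
--     # DP over reachable (group1-sum, group2-sum) partial states; group 3 is implicit.
--     states = {(0, 0)}
--     for w in weights:
--         states = (states
--                   | {(s1 + w, s2) for (s1, s2) in states}
--                   | {(s1, s2 + w) for (s1, s2) in states})
--     return (target, target) in states
-- ===== Notes on version B (the rewrite author's own statement) =====
-- stated objective: alternative
-- what changed: Replaces the exponential 3-way recursion rec (trying all 3^n group assignments) by a subset-sum dynamic program over the set of reachable (group1-sum, group2-sum) partial states, and restructures the weight helper as find-smallest-divisor / strip / recurse instead of A's single interleaved accumulator loop.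
import Mathlib
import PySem

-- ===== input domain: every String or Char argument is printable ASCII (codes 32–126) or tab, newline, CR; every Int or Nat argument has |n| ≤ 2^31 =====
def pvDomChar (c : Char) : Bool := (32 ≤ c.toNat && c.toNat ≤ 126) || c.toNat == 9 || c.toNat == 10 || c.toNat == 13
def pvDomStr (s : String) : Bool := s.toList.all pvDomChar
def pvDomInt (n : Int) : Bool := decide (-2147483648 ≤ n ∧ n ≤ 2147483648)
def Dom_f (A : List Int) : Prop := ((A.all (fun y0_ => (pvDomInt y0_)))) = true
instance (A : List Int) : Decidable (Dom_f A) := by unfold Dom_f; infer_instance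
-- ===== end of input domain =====

-- B replaces A's exponential 3-way recursion by a subset-sum DP over reachable
-- (s1,s2) partial-sum states, and decomposes the weight helper differently.

-- ===== PORT A =====
-- A's while loops run on a Nat fuel that is a totality device only: the fuel (the
-- loop's decreasing measure) is never exhausted while a guard still holds, so each
-- function computes exactly what its Python computes.

-- inner loop 'while x % divisor == 0: x //= divisor'.  The conjuncts 1 ≤ x ∧ 2 ≤ d are
-- totality guards only: they hold at every reachable call (pvWcLoop calls with 1 < x, 2 ≤ d).
def pvStripF : Nat → Int → Int → Int
  | 0, x, _ => x
  | n + 1, x, d =>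
      if PySem.Int.mod x d = 0 ∧ 1 ≤ x ∧ 2 ≤ d then pvStripF n (PySem.Int.floordiv x d) d
      else x

def pvStrip (x d : Int) : Int := pvStripF x.toNat x d

-- outer 'while x > 1 and divisor < x // 2' loop of weight_count
def pvWcLoopF : Nat → Int → Int → Int → Int
  | 0, _, _, w => w
  | n + 1, x, d, w =>
      if 1 < x ∧ d < PySem.Int.floordiv x 2 then
        if PySem.Int.mod x d = 0 then pvWcLoopF n (pvStrip x d) (d + 1) (w + 1)
        else pvWcLoopF n x (d + 1) w
      else w

def pvWcLoop (x d w : Int) : Int := pvWcLoopF (PySem.Int.floordiv x 2 - d).toNat x d w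

def pvWeightCount (x : Int) : Int := if x = 1 then 0 else pvWcLoop x 2 0

-- rec(tab, i, s1, s2, s3): the index i walks tab left to right = structural recursion
def pvRec : List Int → Int → Int → Int → Bool
  | [], s1, s2, s3 => s1 == s2 && s2 == s3
  | w :: t, s1, s2, s3 =>
      pvRec t (s1 + w) s2 s3 || pvRec t s1 (s2 + w) s3 || pvRec t s1 s2 (s3 + w)

def f (A : List Int) : Bool :=
  let st := A.foldl (fun (st : List Int × Int) a =>
      let w := pvWeightCount a
      (st.1 ++ [w], st.2 + w)) ([], 0)
  if PySem.Int.mod st.2 3 ≠ 0 then false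
  else if pvRec st.1 0 0 0 then true else false

-- ===== PORT B =====
-- B's loops/recursions run on a Nat fuel that is a totality device only: the fuel
-- (the loop's decreasing measure) is never exhausted while a guard still holds,
-- so each function computes exactly what its Python computes.

-- _find_div: smallest p with 2 <= p < x//2 dividing x, else none
def pvFindDivF : Nat → Int → Int → Option Int
  | 0, _, _ => none
  | n + 1, x, p =>
      if 1 < x ∧ p < PySem.Int.floordiv x 2 then
        if PySem.Int.mod x p = 0 then some p else pvFindDivF n x (p + 1)
      else none

def pvFindDiv (x p : Int) : Option Int :=
  pvFindDivF (PySem.Int.floordiv x 2 - p).toNat x p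

-- 'while x % p == 0: x //= p' in _wc; the conjuncts 2 ≤ p ∧ 1 < x are totality guards
-- only: every reachable call has them (p from pvFindDiv divides x and x > 1)
def pvStripBF : Nat → Int → Int → Int
  | 0, x, _ => x
  | n + 1, x, p =>
      if 2 ≤ p ∧ 1 < x ∧ PySem.Int.mod x p = 0 then pvStripBF n (PySem.Int.floordiv x p) p
      else x

def pvStripB (x p : Int) : Int := pvStripBF x.toNat x p

-- _wc: find the smallest counted divisor, strip it, recurse
def pvWcBF : Nat → Int → Int
  | 0, _ => 0
  | n + 1, x =>
      if 1 < x then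
        match pvFindDiv x 2 with
        | none => 0
        | some p => 1 + pvWcBF n (pvStripB x p)
      else 0

def pvWcB (x : Int) : Int := pvWcBF x.toNat x

-- one DP step: states | {(s1+w,s2) …} | {(s1,s2+w) …}
def pvStep (st : PySem.Set (Int × Int)) (w : Int) : PySem.Set (Int × Int) :=
  PySem.Set.union (PySem.Set.union st
      (PySem.Set.ofList (st.map (fun q => (q.1 + w, q.2)))))
      (PySem.Set.ofList (st.map (fun q => (q.1, q.2 + w))))

def f_alt (A : List Int) : Bool :=
  let weights := A.map pvWcB
  let total := weights.sum
  if PySem.Int.mod total 3 ≠ 0 then false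
  else
    let target := PySem.Int.floordiv total 3
    let states := weights.foldl pvStep (PySem.Set.ofList [((0:Int), (0:Int))])
    PySem.Set.contains states (target, target)

-- ===== PRECONDITION & SPEC =====
def Spec_f (A : List Int) (out : Bool) : Prop := out = f_alt A
instance (A : List Int) (out : Bool) : Decidable (Spec_f A out) := by unfold Spec_f; infer_instance

-- ===== CLAIM (what is proved, stated in full; the proofs are below) =====
def Claim_equal_f : Prop := ∀ (A : List Int), Dom_f A → Spec_f A (f A)

-- ===== LEMMAS AND PROOFS =====

theorem pvQuot_lt (x d : Int) (h0 : PySem.Int.mod x d = 0) (h1 : 1 ≤ x) (h2 : 2 ≤ d) :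
    1 ≤ PySem.Int.floordiv x d ∧ PySem.Int.floordiv x d < x := by
  obtain ⟨k, hk⟩ := (PySem.Int.mod_eq_zero_iff_dvd x d).mp h0
  have hd : PySem.Int.floordiv x d = k := by
    rw [PySem.Int.floordiv_eq_ediv_of_pos (by omega : (0:Int) < d), hk]
    exact Int.mul_ediv_cancel_left k (by omega)
  have hk1 : 1 ≤ k := by
    by_contra hneg
    have : d * k ≤ 0 := mul_nonpos_of_nonneg_of_nonpos (by omega) (by omega)
    omega
  have hkx : k < x := by
    have h2k : 2 * k ≤ d * k := mul_le_mul_of_nonneg_right (by omega) (by omega)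
    omega
  rw [hd]; exact ⟨hk1, hkx⟩

theorem pvStripF_fuel : ∀ (n m : Nat) (x d : Int), x.toNat ≤ n → x.toNat ≤ m →
    pvStripF n x d = pvStripF m x d := by
  intro n
  induction n with
  | zero =>
    intro m x d hn _
    cases m with
    | zero => rfl
    | succ k => simp only [pvStripF]; rw [if_neg (by omega)]
  | succ n ih =>
    intro m x d hn hm
    cases m with
    | zero => simp only [pvStripF]; rw [if_neg (by omega)]
    | succ k =>
      simp only [pvStripF]
      by_cases hg : PySem.Int.mod x d = 0 ∧ 1 ≤ x ∧ 2 ≤ d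
      · rw [if_pos hg, if_pos hg]
        have hq := pvQuot_lt x d hg.1 hg.2.1 hg.2.2
        exact ih k _ d (by omega) (by omega)
      · rw [if_neg hg, if_neg hg]

theorem pvStrip_unfold (x d : Int) :
    pvStrip x d =
      if PySem.Int.mod x d = 0 ∧ 1 ≤ x ∧ 2 ≤ d then pvStrip (PySem.Int.floordiv x d) d
      else x := by
  unfold pvStrip
  by_cases hg : PySem.Int.mod x d = 0 ∧ 1 ≤ x ∧ 2 ≤ d
  · have hq := pvQuot_lt x d hg.1 hg.2.1 hg.2.2
    have h1 : x.toNat = (x.toNat - 1) + 1 := by omega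
    rw [h1]
    simp only [pvStripF, if_pos hg]
    exact pvStripF_fuel _ _ _ d (by omega) le_rfl
  · rw [if_neg hg]
    cases hn : x.toNat with
    | zero => rfl
    | succ k => simp only [pvStripF]; rw [if_neg hg]

theorem pvStripF_le : ∀ (n : Nat) (x d : Int), pvStripF n x d ≤ x := by
  intro n
  induction n with
  | zero => intro x d; exact le_refl x
  | succ n ih =>
    intro x d
    simp only [pvStripF]
    by_cases hg : PySem.Int.mod x d = 0 ∧ 1 ≤ x ∧ 2 ≤ d
    · rw [if_pos hg]
      have hq := pvQuot_lt x d hg.1 hg.2.1 hg.2.2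
      exact le_trans (ih _ d) (by omega)
    · rw [if_neg hg]

theorem pvStrip_le (x d : Int) : pvStrip x d ≤ x := pvStripF_le x.toNat x d

theorem pvWcLoopF_fuel : ∀ (n m : Nat) (x d w : Int),
    (PySem.Int.floordiv x 2 - d).toNat ≤ n → (PySem.Int.floordiv x 2 - d).toNat ≤ m →
    pvWcLoopF n x d w = pvWcLoopF m x d w := by
  intro n
  induction n with
  | zero =>
    intro m x d w hn _
    cases m with
    | zero => rfl
    | succ k => simp only [pvWcLoopF]; rw [if_neg (by omega)]
  | succ n ih =>
    intro m x d w hn hm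
    cases m with
    | zero => simp only [pvWcLoopF]; rw [if_neg (by omega)]
    | succ k =>
      simp only [pvWcLoopF]
      by_cases hg : 1 < x ∧ d < PySem.Int.floordiv x 2
      · rw [if_pos hg, if_pos hg]
        have hle : pvStrip x d ≤ x := pvStrip_le x d
        have hmono : PySem.Int.floordiv (pvStrip x d) 2 ≤ PySem.Int.floordiv x 2 := by
          rw [PySem.Int.floordiv_eq_ediv_of_pos (by omega : (0:Int) < 2),
              PySem.Int.floordiv_eq_ediv_of_pos (by omega : (0:Int) < 2)]
          exact Int.ediv_le_ediv (by omega) hle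
        by_cases hm' : PySem.Int.mod x d = 0
        · rw [if_pos hm', if_pos hm']
          exact ih k _ (d + 1) (w + 1) (by omega) (by omega)
        · rw [if_neg hm', if_neg hm']
          exact ih k x (d + 1) w (by omega) (by omega)
      · rw [if_neg hg, if_neg hg]

theorem pvWcLoop_unfold (x d w : Int) :
    pvWcLoop x d w =
      if 1 < x ∧ d < PySem.Int.floordiv x 2 then
        if PySem.Int.mod x d = 0 then pvWcLoop (pvStrip x d) (d + 1) (w + 1)
        else pvWcLoop x (d + 1) w
      else w := by
  unfold pvWcLoop
  by_cases hg : 1 < x ∧ d < PySem.Int.floordiv x 2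
  · have h1 : (PySem.Int.floordiv x 2 - d).toNat
        = (PySem.Int.floordiv x 2 - (d + 1)).toNat + 1 := by omega
    rw [h1]
    simp only [pvWcLoopF, if_pos hg]
    have hle : pvStrip x d ≤ x := pvStrip_le x d
    have hmono : PySem.Int.floordiv (pvStrip x d) 2 ≤ PySem.Int.floordiv x 2 := by
      rw [PySem.Int.floordiv_eq_ediv_of_pos (by omega : (0:Int) < 2),
          PySem.Int.floordiv_eq_ediv_of_pos (by omega : (0:Int) < 2)]
      exact Int.ediv_le_ediv (by omega) hle
    by_cases hm' : PySem.Int.mod x d = 0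
    · rw [if_pos hm', if_pos hm']
      exact pvWcLoopF_fuel _ _ _ (d + 1) (w + 1) (by omega) le_rfl
    · rw [if_neg hm', if_neg hm']
  · rw [if_neg hg]
    cases hn : (PySem.Int.floordiv x 2 - d).toNat with
    | zero => rfl
    | succ k => simp only [pvWcLoopF]; rw [if_neg hg]

theorem pvStrip_dvd_aux (n : Nat) : ∀ (x d : Int), pvStripF n x d ∣ x := by
  induction n with
  | zero => intro x d; exact dvd_refl x
  | succ n ih =>
    intro x d
    simp only [pvStripF]
    by_cases hg : PySem.Int.mod x d = 0 ∧ 1 ≤ x ∧ 2 ≤ d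
    · rw [if_pos hg]
      obtain ⟨k, hk⟩ := (PySem.Int.mod_eq_zero_iff_dvd x d).mp hg.1
      have hd : PySem.Int.floordiv x d = k := by
        rw [PySem.Int.floordiv_eq_ediv_of_pos (by omega : (0:Int) < d), hk]
        exact Int.mul_ediv_cancel_left k (by omega)
      rw [hd]
      exact dvd_trans (ih k d) ⟨d, by rw [hk]; ring⟩
    · rw [if_neg hg]

theorem pvStrip_dvd (x d : Int) : pvStrip x d ∣ x := pvStrip_dvd_aux x.toNat x d

theorem pvStrip_not_dvd_aux (n : Nat) : ∀ (x d : Int), x.toNat ≤ n → 1 ≤ x → 2 ≤ d →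
    PySem.Int.mod (pvStripF n x d) d ≠ 0 := by
  induction n with
  | zero => intro x d hn hx hd; omega
  | succ n ih =>
    intro x d hn hx hd
    simp only [pvStripF]
    by_cases hg : PySem.Int.mod x d = 0 ∧ 1 ≤ x ∧ 2 ≤ d
    · rw [if_pos hg]
      have hq := pvQuot_lt x d hg.1 hg.2.1 hg.2.2
      exact ih _ d (by omega) hq.1 hd
    · rw [if_neg hg]; tauto

theorem pvStrip_not_dvd (x d : Int) (hx : 1 ≤ x) (hd : 2 ≤ d) :
    PySem.Int.mod (pvStrip x d) d ≠ 0 :=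
  pvStrip_not_dvd_aux x.toNat x d le_rfl hx hd


theorem pvQuotB_lt (x p : Int) (h2 : 2 ≤ p) (h1 : 1 < x) (h0 : PySem.Int.mod x p = 0) :
    1 ≤ PySem.Int.floordiv x p ∧ PySem.Int.floordiv x p < x := by
  obtain ⟨k, hk⟩ := (PySem.Int.mod_eq_zero_iff_dvd x p).mp h0
  have hd : PySem.Int.floordiv x p = k := by
    rw [PySem.Int.floordiv_eq_ediv_of_pos (by omega : (0:Int) < p), hk]
    exact Int.mul_ediv_cancel_left k (by omega)
  have hk1 : 1 ≤ k := by
    by_contra hneg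
    have : p * k ≤ 0 := mul_nonpos_of_nonneg_of_nonpos (by omega) (by omega)
    omega
  have hkx : k < x := by
    have h2k : 2 * k ≤ p * k := mul_le_mul_of_nonneg_right (by omega) (by omega)
    omega
  rw [hd]; exact ⟨hk1, hkx⟩

-- the fuel of pvFindDivF is exactly the loop measure: the wrapper satisfies the
-- guarded unfolding equation of the Python while loop
theorem pvFindDiv_eq (x p : Int) :
    pvFindDiv x p =
      if 1 < x ∧ p < PySem.Int.floordiv x 2 then
        (if PySem.Int.mod x p = 0 then some p else pvFindDiv x (p + 1))
      else none := by
  unfold pvFindDiv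
  by_cases hg : 1 < x ∧ p < PySem.Int.floordiv x 2
  · have h1 : (PySem.Int.floordiv x 2 - p).toNat
        = (PySem.Int.floordiv x 2 - (p + 1)).toNat + 1 := by omega
    rw [h1]
    simp only [pvFindDivF, if_pos hg]
  · rw [if_neg hg]
    cases hn : (PySem.Int.floordiv x 2 - p).toNat with
    | zero => rfl
    | succ k => simp only [pvFindDivF]; rw [if_neg hg]

theorem pvStripBF_fuel : ∀ (n m : Nat) (x p : Int), x.toNat ≤ n → x.toNat ≤ m →
    pvStripBF n x p = pvStripBF m x p := by
  intro n
  induction n with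
  | zero =>
    intro m x p hn _
    cases m with
    | zero => rfl
    | succ k => simp only [pvStripBF]; rw [if_neg (by omega)]
  | succ n ih =>
    intro m x p hn hm
    cases m with
    | zero => simp only [pvStripBF]; rw [if_neg (by omega)]
    | succ k =>
      simp only [pvStripBF]
      by_cases hg : 2 ≤ p ∧ 1 < x ∧ PySem.Int.mod x p = 0
      · rw [if_pos hg, if_pos hg]
        have hq := pvQuotB_lt x p hg.1 hg.2.1 hg.2.2
        exact ih k _ p (by omega) (by omega)
      · rw [if_neg hg, if_neg hg]

theorem pvStripB_eq (x p : Int) :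
    pvStripB x p =
      if 2 ≤ p ∧ 1 < x ∧ PySem.Int.mod x p = 0 then pvStripB (PySem.Int.floordiv x p) p
      else x := by
  unfold pvStripB
  by_cases hg : 2 ≤ p ∧ 1 < x ∧ PySem.Int.mod x p = 0
  · have hq := pvQuotB_lt x p hg.1 hg.2.1 hg.2.2
    have h1 : x.toNat = (x.toNat - 1) + 1 := by omega
    rw [h1]
    simp only [pvStripBF, if_pos hg]
    exact pvStripBF_fuel _ _ _ p (by omega) le_rfl
  · rw [if_neg hg]
    cases hn : x.toNat with
    | zero => rfl
    | succ k => simp only [pvStripBF]; rw [if_neg hg]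

theorem pvStripBF_le : ∀ (n : Nat) (x p : Int), pvStripBF n x p ≤ x := by
  intro n
  induction n with
  | zero => intro x p; exact le_refl x
  | succ n ih =>
    intro x p
    simp only [pvStripBF]
    by_cases hg : 2 ≤ p ∧ 1 < x ∧ PySem.Int.mod x p = 0
    · rw [if_pos hg]
      have hq := pvQuotB_lt x p hg.1 hg.2.1 hg.2.2
      exact le_trans (ih _ p) (by omega)
    · rw [if_neg hg]

theorem pvStripB_le (x p : Int) : pvStripB x p ≤ x := pvStripBF_le x.toNat x p

theorem pvFindDiv_someF : ∀ (n : Nat) (x p0 p : Int), pvFindDivF n x p0 = some p →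
    1 < x ∧ p0 ≤ p ∧ p < PySem.Int.floordiv x 2 ∧ PySem.Int.mod x p = 0 := by
  intro n
  induction n with
  | zero => intro x p0 p h; cases h
  | succ n ih =>
    intro x p0 p h
    simp only [pvFindDivF] at h
    by_cases hg : 1 < x ∧ p0 < PySem.Int.floordiv x 2
    · rw [if_pos hg] at h
      by_cases hm : PySem.Int.mod x p0 = 0
      · rw [if_pos hm] at h
        cases h
        exact ⟨hg.1, le_refl p0, hg.2, hm⟩
      · rw [if_neg hm] at h
        obtain ⟨hx, hp, hlt, hm'⟩ := ih x (p0 + 1) p h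
        exact ⟨hx, by omega, hlt, hm'⟩
    · rw [if_neg hg] at h; cases h

theorem pvFindDiv_some {x p0 p : Int} (h : pvFindDiv x p0 = some p) :
    1 < x ∧ p0 ≤ p ∧ p < PySem.Int.floordiv x 2 ∧ PySem.Int.mod x p = 0 :=
  pvFindDiv_someF _ x p0 p h

theorem pvWcB_step_lt (x p : Int) (hx : 1 < x) (hp : pvFindDiv x 2 = some p) :
    (pvStripB x p).toNat < x.toNat := by
  obtain ⟨hx1, hp2, hplt, hmod⟩ := pvFindDiv_some hp
  have hq := pvQuotB_lt x p hp2 hx1 hmod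
  have hstep : pvStripB x p = pvStripB (PySem.Int.floordiv x p) p := by
    rw [pvStripB_eq, if_pos ⟨hp2, hx, hmod⟩]
  have hle : pvStripB (PySem.Int.floordiv x p) p ≤ PySem.Int.floordiv x p :=
    pvStripB_le (PySem.Int.floordiv x p) p
  rw [hstep]
  omega

theorem pvWcBF_fuel : ∀ (n m : Nat) (x : Int), x.toNat ≤ n → x.toNat ≤ m →
    pvWcBF n x = pvWcBF m x := by
  intro n
  induction n with
  | zero =>
    intro m x hn _
    cases m with
    | zero => rfl
    | succ k => simp only [pvWcBF]; rw [if_neg (by omega)]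
  | succ n ih =>
    intro m x hn hm
    cases m with
    | zero => simp only [pvWcBF]; rw [if_neg (by omega)]
    | succ k =>
      simp only [pvWcBF]
      by_cases hx : 1 < x
      · rw [if_pos hx, if_pos hx]
        cases hp : pvFindDiv x 2 with
        | none => rfl
        | some p =>
          have hlt := pvWcB_step_lt x p hx hp
          show 1 + pvWcBF n (pvStripB x p) = 1 + pvWcBF k (pvStripB x p)
          rw [ih k (pvStripB x p) (by omega) (by omega)]
      · rw [if_neg hx, if_neg hx]

theorem pvWcB_eq (x : Int) :
    pvWcB x =
      if 1 < x then
        match pvFindDiv x 2 with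
        | none => 0
        | some p => 1 + pvWcB (pvStripB x p)
      else 0 := by
  unfold pvWcB
  by_cases hx : 1 < x
  · have h1 : x.toNat = (x.toNat - 1) + 1 := by omega
    rw [h1]
    simp only [pvWcBF, if_pos hx]
    cases hp : pvFindDiv x 2 with
    | none => rfl
    | some p =>
      have hlt := pvWcB_step_lt x p hx hp
      show 1 + pvWcBF (x.toNat - 1) (pvStripB x p)
          = 1 + pvWcBF (pvStripB x p).toNat (pvStripB x p)
      rw [pvWcBF_fuel (x.toNat - 1) (pvStripB x p).toNat (pvStripB x p) (by omega) le_rfl]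
  · rw [if_neg hx]
    cases hn : x.toNat with
    | zero => rfl
    | succ k => simp only [pvWcBF]; rw [if_neg hx]

theorem pvWcB_none {x : Int} (hx : 1 < x) (h : pvFindDiv x 2 = none) : pvWcB x = 0 := by
  rw [pvWcB_eq, if_pos hx, h]

theorem pvWcB_some {x : Int} (hx : 1 < x) {p : Int} (h : pvFindDiv x 2 = some p) :
    pvWcB x = 1 + pvWcB (pvStripB x p) := by
  rw [pvWcB_eq, if_pos hx, h]

-- The two strip loops agree (their totality guards coincide on 2 ≤ p, 1 ≤ x)
theorem pvStrip_eq_pvStripB_aux (n : Nat) : ∀ (x p : Int), x.toNat ≤ n → 1 ≤ x → 2 ≤ p →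
    pvStrip x p = pvStripB x p := by
  induction n with
  | zero => intro x p hn hx hp; omega
  | succ n ih =>
    intro x p hn hx hp
    rw [pvStrip_unfold, pvStripB_eq]
    by_cases hm : PySem.Int.mod x p = 0
    · by_cases hx1 : 1 < x
      · rw [if_pos ⟨hm, by omega, hp⟩, if_pos ⟨hp, hx1, hm⟩]
        have hq := pvQuot_lt x p hm (by omega) hp
        exact ih _ p (by omega) hq.1 hp
      · -- x = 1 and p ∣ 1 with 2 ≤ p is impossible
        have h1 : x = 1 := by omega
        subst h1
        obtain ⟨k, hk⟩ := (PySem.Int.mod_eq_zero_iff_dvd 1 p).mp hm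
        rcases Int.lt_or_lt_of_ne (a := k) (b := 0) (by rintro rfl; omega) with hneg | hpos
        · nlinarith
        · nlinarith
    · rw [if_neg (by tauto), if_neg (by tauto)]

theorem pvStrip_eq_pvStripB (x p : Int) (hx : 1 ≤ x) (hp : 2 ≤ p) :
    pvStrip x p = pvStripB x p :=
  pvStrip_eq_pvStripB_aux x.toNat x p le_rfl hx hp

-- scanning one non-dividing candidate further
theorem pvFindDiv_step (x e : Int) (hm : PySem.Int.mod x e ≠ 0) :
    pvFindDiv x e = pvFindDiv x (e + 1) := by
  by_cases hg : 1 < x ∧ e < PySem.Int.floordiv x 2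
  · rw [pvFindDiv_eq, if_pos hg, if_neg hm]
  · rw [pvFindDiv_eq, if_neg hg, pvFindDiv_eq, if_neg (by omega)]

-- no divisor below d ⇒ scanning may start at d
theorem pvFindDiv_from (x : Int) : ∀ (m : Nat) (d : Int), d = 2 + (m : Int) →
    (∀ e : Int, 2 ≤ e → e < d → PySem.Int.mod x e ≠ 0) →
    pvFindDiv x 2 = pvFindDiv x d := by
  intro m
  induction m with
  | zero => intro d hd _; rw [hd]; norm_num
  | succ k ih =>
    intro d hd hno
    have hstep : pvFindDiv x (d - 1) = pvFindDiv x d := by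
      have := pvFindDiv_step x (d - 1) (hno (d - 1) (by omega) (by omega))
      simpa [sub_add_cancel] using this
    rw [← hstep]
    exact ih (d - 1) (by omega) (fun e he hlt => hno e he (by omega))

-- the main bridge: A's interleaved loop = accumulator + B's recursive decomposition
theorem pvWcLoop_eq_aux (n : Nat) : ∀ (x d w : Int),
    (PySem.Int.floordiv x 2 - d).toNat ≤ n → 2 ≤ d →
    (∀ e : Int, 2 ≤ e → e < d → PySem.Int.mod x e ≠ 0) →
    pvWcLoop x d w = w + pvWcB x := by
  induction n with
  | zero =>
    intro x d w hn hd hno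
    rw [pvWcLoop_unfold, if_neg (by omega)]
    by_cases hx : 1 < x
    · have hfd : pvFindDiv x 2 = pvFindDiv x d :=
        pvFindDiv_from x (d - 2).toNat d (by omega) hno
      have hnone : pvFindDiv x d = none := by rw [pvFindDiv_eq, if_neg (by omega)]
      rw [pvWcB_none hx (hfd.trans hnone)]
      omega
    · rw [pvWcB_eq, if_neg hx]; omega
  | succ n ih =>
    intro x d w hn hd hno
    by_cases hg : 1 < x ∧ d < PySem.Int.floordiv x 2
    · have hfd : pvFindDiv x 2 = pvFindDiv x d :=
        pvFindDiv_from x (d - 2).toNat d (by omega) hno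
      by_cases hm : PySem.Int.mod x d = 0
      · -- d is found, stripped, counted
        rw [pvWcLoop_unfold, if_pos hg, if_pos hm]
        have hsome : pvFindDiv x d = some d := by
          rw [pvFindDiv_eq, if_pos hg, if_pos hm]
        have hwcb : pvWcB x = 1 + pvWcB (pvStripB x d) :=
          pvWcB_some hg.1 (hfd.trans hsome)
        rw [hwcb, ← pvStrip_eq_pvStripB x d (by omega) hd]
        set x' := pvStrip x d with hx'
        have hle : x' ≤ x := pvStrip_le x d
        have hmono : PySem.Int.floordiv x' 2 ≤ PySem.Int.floordiv x 2 := by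
          rw [PySem.Int.floordiv_eq_ediv_of_pos (by omega : (0:Int) < 2),
              PySem.Int.floordiv_eq_ediv_of_pos (by omega : (0:Int) < 2)]
          exact Int.ediv_le_ediv (by omega) hle
        have hdvd : x' ∣ x := pvStrip_dvd x d
        have hrec := ih x' (d + 1) (w + 1) (by omega) (by omega) ?_
        · rw [hrec]; omega
        · intro e he hlt
          by_cases hed : e = d
          · rw [hed]; exact pvStrip_not_dvd x d (by omega) hd
          · intro hcon
            obtain ⟨k, hk⟩ := (PySem.Int.mod_eq_zero_iff_dvd x' e).mp hcon
            exact hno e he (by omega)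
              ((PySem.Int.mod_eq_zero_iff_dvd x e).mpr (dvd_trans ⟨k, hk⟩ hdvd))
      · -- d does not divide: advance the scan
        rw [pvWcLoop_unfold, if_pos hg, if_neg hm]
        exact ih x (d + 1) w (by omega) (by omega)
          (fun e he hlt => by
            by_cases hed : e = d
            · subst hed; exact hm
            · exact hno e he (by omega))
    · rw [pvWcLoop_unfold, if_neg hg]
      by_cases hx : 1 < x
      · have hfd : pvFindDiv x 2 = pvFindDiv x d :=
          pvFindDiv_from x (d - 2).toNat d (by omega) hno
        have hnone : pvFindDiv x d = none := by rw [pvFindDiv_eq, if_neg hg]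
        rw [pvWcB_none hx (hfd.trans hnone)]
        omega
      · rw [pvWcB_eq, if_neg hx]; omega

theorem pvWeightCount_eq (x : Int) : pvWeightCount x = pvWcB x := by
  unfold pvWeightCount
  by_cases h1 : x = 1
  · subst h1; rw [pvWcB_eq]; norm_num
  · rw [if_neg h1]
    exact (pvWcLoop_eq_aux (PySem.Int.floordiv x 2 - 2).toNat x 2 0 le_rfl (by omega)
      (fun e he hlt => by omega)).trans (by omega)

-- PvSplit t a b c: t can be split into three groups with sums a, b, c
inductive PvSplit : List Int → Int → Int → Int → Prop
  | nil : PvSplit [] 0 0 0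
  | one {t : List Int} {a b c : Int} (w : Int) : PvSplit t a b c → PvSplit (w :: t) (a + w) b c
  | two {t : List Int} {a b c : Int} (w : Int) : PvSplit t a b c → PvSplit (w :: t) a (b + w) c
  | three {t : List Int} {a b c : Int} (w : Int) : PvSplit t a b c → PvSplit (w :: t) a b (c + w)

theorem pvSplit_nil_iff (a b c : Int) : PvSplit [] a b c ↔ a = 0 ∧ b = 0 ∧ c = 0 := by
  constructor
  · intro h; cases h; exact ⟨rfl, rfl, rfl⟩
  · rintro ⟨rfl, rfl, rfl⟩; exact PvSplit.nil

theorem pvSplit_cons_iff (w : Int) (t : List Int) (a b c : Int) :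
    PvSplit (w :: t) a b c ↔
      (∃ a', PvSplit t a' b c ∧ a = a' + w) ∨
      (∃ b', PvSplit t a b' c ∧ b = b' + w) ∨
      (∃ c', PvSplit t a b c' ∧ c = c' + w) := by
  constructor
  · intro h
    cases h with
    | one _ h => exact Or.inl ⟨_, h, rfl⟩
    | two _ h => exact Or.inr (Or.inl ⟨_, h, rfl⟩)
    | three _ h => exact Or.inr (Or.inr ⟨_, h, rfl⟩)
  · rintro (⟨a', h, rfl⟩ | ⟨b', h, rfl⟩ | ⟨c', h, rfl⟩)
    · exact PvSplit.one w h
    · exact PvSplit.two w h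
    · exact PvSplit.three w h

theorem pvSplit_sum {t : List Int} {a b c : Int} (h : PvSplit t a b c) :
    a + b + c = t.sum := by
  induction h with
  | nil => simp
  | one w _ ih => simp [List.sum_cons]; omega
  | two w _ ih => simp [List.sum_cons]; omega
  | three w _ ih => simp [List.sum_cons]; omega

theorem pvRec_iff (t : List Int) : ∀ s1 s2 s3 : Int,
    pvRec t s1 s2 s3 = true ↔
      ∃ a b c, PvSplit t a b c ∧ s1 + a = s2 + b ∧ s2 + b = s3 + c := by
  induction t with
  | nil =>
    intro s1 s2 s3
    simp only [pvRec, Bool.and_eq_true, beq_iff_eq]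
    constructor
    · rintro ⟨h1, h2⟩; exact ⟨0, 0, 0, PvSplit.nil, by omega, by omega⟩
    · rintro ⟨a, b, c, h, h1, h2⟩
      rw [pvSplit_nil_iff] at h
      omega
  | cons w t ih =>
    intro s1 s2 s3
    simp only [pvRec, Bool.or_eq_true, ih]
    constructor
    · rintro ((⟨a, b, c, h, h1, h2⟩ | ⟨a, b, c, h, h1, h2⟩) | ⟨a, b, c, h, h1, h2⟩)
      · exact ⟨a + w, b, c, PvSplit.one w h, by omega, by omega⟩
      · exact ⟨a, b + w, c, PvSplit.two w h, by omega, by omega⟩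
      · exact ⟨a, b, c + w, PvSplit.three w h, by omega, by omega⟩
    · rintro ⟨a, b, c, h, h1, h2⟩
      rw [pvSplit_cons_iff] at h
      rcases h with ⟨a', h, rfl⟩ | ⟨b', h, rfl⟩ | ⟨c', h, rfl⟩
      · exact Or.inl (Or.inl ⟨a', b, c, h, by omega, by omega⟩)
      · exact Or.inl (Or.inr ⟨a, b', c, h, by omega, by omega⟩)
      · exact Or.inr ⟨a, b, c', h, by omega, by omega⟩

theorem mem_pvStep (st : PySem.Set (Int × Int)) (w : Int) (p : Int × Int) :
    p ∈ pvStep st w ↔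
      (∃ q ∈ st, p = (q.1 + w, q.2)) ∨ (∃ q ∈ st, p = (q.1, q.2 + w)) ∨ p ∈ st := by
  simp only [pvStep, PySem.Set.mem_union, PySem.Set.mem_ofList, List.mem_map]
  constructor
  · rintro ((h | ⟨q, hq, rfl⟩) | ⟨q, hq, rfl⟩)
    · exact Or.inr (Or.inr h)
    · exact Or.inl ⟨q, hq, rfl⟩
    · exact Or.inr (Or.inl ⟨q, hq, rfl⟩)
  · rintro (⟨q, hq, rfl⟩ | ⟨q, hq, rfl⟩ | h)
    · exact Or.inl (Or.inr ⟨q, hq, rfl⟩)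
    · exact Or.inr ⟨q, hq, rfl⟩
    · exact Or.inl (Or.inl h)

theorem mem_foldl_pvStep (t : List Int) : ∀ (st : PySem.Set (Int × Int)) (p : Int × Int),
    p ∈ t.foldl pvStep st ↔
      ∃ q ∈ st, ∃ a b c, PvSplit t a b c ∧ p = (q.1 + a, q.2 + b) := by
  induction t with
  | nil =>
    intro st p
    simp only [List.foldl_nil]
    constructor
    · intro h; exact ⟨p, h, 0, 0, 0, PvSplit.nil, by simp⟩
    · rintro ⟨q, hq, a, b, c, h, rfl⟩
      rw [pvSplit_nil_iff] at h
      obtain ⟨rfl, rfl, rfl⟩ := h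
      simpa using hq
  | cons w t ih =>
    intro st p
    simp only [List.foldl_cons, ih]
    constructor
    · rintro ⟨q, hq, a, b, c, h, rfl⟩
      rw [mem_pvStep] at hq
      rcases hq with ⟨r, hr, rfl⟩ | ⟨r, hr, rfl⟩ | hr
      · exact ⟨r, hr, a + w, b, c, PvSplit.one w h, by simp [Prod.ext_iff] <;> omega⟩
      · exact ⟨r, hr, a, b + w, c, PvSplit.two w h, by simp [Prod.ext_iff] <;> omega⟩
      · exact ⟨q, hr, a, b, c + w, PvSplit.three w h, rfl⟩
    · rintro ⟨q, hq, a, b, c, h, rfl⟩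
      rw [pvSplit_cons_iff] at h
      rcases h with ⟨a', h, rfl⟩ | ⟨b', h, rfl⟩ | ⟨c', h, rfl⟩
      · exact ⟨(q.1 + w, q.2), (mem_pvStep st w _).mpr (Or.inl ⟨q, hq, rfl⟩),
          a', b, c, h, by simp [Prod.ext_iff] <;> omega⟩
      · exact ⟨(q.1, q.2 + w), (mem_pvStep st w _).mpr (Or.inr (Or.inl ⟨q, hq, rfl⟩)),
          a, b', c, h, by simp [Prod.ext_iff] <;> omega⟩
      · exact ⟨q, (mem_pvStep st w _).mpr (Or.inr (Or.inr hq)), a, b, c', h, rfl⟩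

-- A's table-and-sum building loop computes the mapped weights and their sum
theorem pvFoldA (A : List Int) : ∀ (tab : List Int) (s : Int),
    A.foldl (fun (st : List Int × Int) a =>
        let w := pvWeightCount a
        (st.1 ++ [w], st.2 + w)) (tab, s)
      = (tab ++ A.map pvWeightCount, s + (A.map pvWeightCount).sum) := by
  induction A with
  | nil => intro tab s; simp
  | cons a A ih => intro tab s; simp [ih, List.sum_cons]; omega

theorem pvKey (W : List Int) (hmod : PySem.Int.mod W.sum 3 = 0) :
    (pvRec W 0 0 0 = true) ↔
      (PySem.Set.contains (W.foldl pvStep (PySem.Set.ofList [((0:Int), (0:Int))]))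
        (PySem.Int.floordiv W.sum 3, PySem.Int.floordiv W.sum 3) = true) := by
  have h3 : PySem.Int.floordiv W.sum 3 * 3 + PySem.Int.mod W.sum 3 = W.sum :=
    PySem.Int.floordiv_mul_add_mod W.sum 3
  set t := PySem.Int.floordiv W.sum 3 with ht
  have h3t : 3 * t = W.sum := by omega
  rw [pvRec_iff, PySem.Set.contains_iff, mem_foldl_pvStep]
  constructor
  · rintro ⟨a, b, c, h, h1, h2⟩
    have hs := pvSplit_sum h
    have ha : a = t := by omega
    have hb : b = t := by omega
    exact ⟨(0, 0), by simp [PySem.Set.mem_ofList], a, b, c, h, by simp [ha, hb]⟩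
  · rintro ⟨q, hq, a, b, c, h, hp⟩
    have hq0 : q = (0, 0) := by simpa [PySem.Set.mem_ofList] using hq
    subst hq0
    simp only [Prod.mk.injEq] at hp
    have hs := pvSplit_sum h
    exact ⟨a, b, c, h, by omega, by omega⟩

-- ===== VERDICT (by name: the statement is the Claim_ definition above) =====
theorem f_spec : Claim_equal_f := by
  unfold Claim_equal_f Spec_f
  intro A _
  unfold f f_alt
  have hmap : A.map pvWeightCount = A.map pvWcB :=
    List.map_congr_left (fun a _ => pvWeightCount_eq a)
  simp only [pvFoldA A [] 0, List.nil_append, hmap, zero_add]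
  set W := A.map pvWcB with hW
  split_ifs with hmod hb
  · rfl
  · rw [not_not] at hmod
    exact ((pvKey W hmod).mp hb).symm
  · rw [not_not] at hmod
    rcases Bool.eq_false_or_eq_true
        (PySem.Set.contains (W.foldl pvStep (PySem.Set.ofList [((0:Int), (0:Int))]))
          (PySem.Int.floordiv W.sum 3, PySem.Int.floordiv W.sum 3)) with hc | hc
    · exact absurd ((pvKey W hmod).mpr hc) hb
    · exact hc.symm
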